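-- pv_equiv track=rewrite | github.com/Ponomaleks/goit-algo-hw-08 | main.py | find_optimal_sequence
-- ===== SOURCE A (Python) =====
-- import heapq
--
-- def find_optimal_sequence(cables):
--     if not cables:
--         return [], 0
--
--     heapq.heapify(cables)
--     combined_cable = 0
--     sequence = []
--
--     while len(cables) > 1:
--         second_cable = heapq.heappop(cables)
--         combined_cable += second_cable
--         sequence.append(second_cable)
--
--     return sequence, combined_cable
-- ===== SOURCE B (Python) =====
-- def find_optimal_sequence(cables):
--     if not cables:
--         return [], 0
--     ordered = sorted(cables)
--     seq = ordered[:-1]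
--     return seq, sum(seq)
-- ===== Notes on version B (the rewrite author's own statement) =====
-- stated objective: simpler
-- what changed: Replaces the heap (heapify + repeated heappop loop with running accumulators) by a single sorted() call, an [:-1] slice and sum(); B also leaves the argument list unmutated where A empties it in place.
import Mathlib
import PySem

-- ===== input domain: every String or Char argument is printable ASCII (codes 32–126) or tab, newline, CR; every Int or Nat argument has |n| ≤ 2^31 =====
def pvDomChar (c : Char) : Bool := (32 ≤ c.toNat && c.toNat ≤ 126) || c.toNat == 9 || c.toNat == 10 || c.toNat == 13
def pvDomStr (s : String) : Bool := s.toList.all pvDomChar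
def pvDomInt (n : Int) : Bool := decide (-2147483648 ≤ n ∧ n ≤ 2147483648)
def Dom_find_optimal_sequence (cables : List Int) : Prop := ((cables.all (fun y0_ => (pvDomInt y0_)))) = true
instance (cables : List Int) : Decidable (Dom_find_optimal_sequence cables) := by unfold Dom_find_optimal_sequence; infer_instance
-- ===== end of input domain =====

-- B replaces A's heap (heapify + heappop loop) with one sort and an [:-1] slice: simpler.
-- Equivalence is about the RETURN value only: Python A mutates `cables` in place (it is left
-- holding just the maximum); B leaves its argument untouched.

-- ===== PORT A =====
-- Model of the heapq library calls A makes: PySem has no heapq, so the priority queue is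
-- modelled by its exact observable semantics on Int — heapify keeps the elements (a heap is
-- a multiset; A never reads the internal layout), heappop removes and returns the minimum.
-- Exact because equal Ints are indistinguishable, so which duplicate is popped is unobservable.
def popLoopA (h : List Int) (combined : Int) (seq : List Int) : List Int × Int :=
  if _hl : 1 < h.length then
    -- second_cable = heapq.heappop(cables): the minimum leaves the queue
    let m := (PySem.List.min? h (fun x => x)).getD 0
    popLoopA (h.erase m) (combined + m) (seq ++ [m])
  else (seq, combined)
  termination_by h.length
  decreasing_by
    have hne : h ≠ [] := by intro he; rw [he] at _hl; simp at _hl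
    obtain ⟨m', hm'⟩ : ∃ m', PySem.List.min? h (fun x => x) = some m' := by
      cases hmo : PySem.List.min? h (fun x => x) with
      | none => exact absurd ((PySem.List.min?_eq_none_iff _ _).mp hmo) hne
      | some m' => exact ⟨m', rfl⟩
    have hmem : (PySem.List.min? h (fun x => x)).getD 0 ∈ h := by
      rw [hm']; exact PySem.List.min?_mem hm'
    have := List.length_erase_of_mem hmem
    omega

def find_optimal_sequence (cables : List Int) : List Int × Int :=
  if cables = [] then ([], 0)
  else popLoopA cables 0 []

-- ===== PORT B =====
def find_optimal_sequence_alt (cables : List Int) : List Int × Int :=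
  if cables = [] then ([], 0)
  else
    let ordered := PySem.List.sorted cables (fun x => x)
    let seq := PySem.List.slice ordered none (some (-1))
    (seq, seq.sum)

-- ===== PRECONDITION & SPEC =====
def Spec_find_optimal_sequence (cables : List Int) (out : List Int × Int) : Prop := out = find_optimal_sequence_alt cables
instance (cables : List Int) (out : List Int × Int) : Decidable (Spec_find_optimal_sequence cables out) := by unfold Spec_find_optimal_sequence; infer_instance

-- ===== CLAIM (what is proved, stated in full; the proofs are below) =====
def Claim_equal_find_optimal_sequence : Prop := ∀ (cables : List Int), Dom_find_optimal_sequence cables → Spec_find_optimal_sequence cables (find_optimal_sequence cables)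

-- ===== LEMMAS AND PROOFS =====

-- sorted h = min :: sorted (h minus one copy of the min)
lemma sorted_cons_min (h : List Int) (m : Int)
    (hm : PySem.List.min? h (fun x => x) = some m) :
    PySem.List.sorted h (fun x => x) = m :: PySem.List.sorted (h.erase m) (fun x => x) := by
  have hmem : m ∈ h := PySem.List.min?_mem hm
  apply PySem.List.sorted_id_eq_of_perm_of_pairwise
  · exact ((PySem.List.sorted_perm _ _ _).cons m).trans (List.perm_cons_erase hmem).symm
  · refine List.pairwise_cons.mpr ⟨?_, PySem.List.sorted_pairwise _ _⟩
    intro x hx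
    have hx' : x ∈ h := List.mem_of_mem_erase ((PySem.List.mem_sorted _ _ _ _).mp hx)
    exact PySem.List.min?_isMin hm x hx'

-- the pop loop appends sorted(h)[:-1] to seq and adds its sum to combined
lemma popLoopA_spec (n : Nat) (h : List Int) (c : Int) (s : List Int)
    (hn : h.length = n) (hne : h ≠ []) :
    popLoopA h c s =
      (s ++ (PySem.List.sorted h (fun x => x)).dropLast,
       c + (PySem.List.sorted h (fun x => x)).dropLast.sum) := by
  induction n generalizing h c s with
  | zero => exact absurd (List.length_eq_zero_iff.mp hn) hne
  | succ k ih =>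
    obtain ⟨m, hm⟩ : ∃ m, PySem.List.min? h (fun x => x) = some m := by
      cases hmo : PySem.List.min? h (fun x => x) with
      | none => exact absurd ((PySem.List.min?_eq_none_iff _ _).mp hmo) hne
      | some m => exact ⟨m, rfl⟩
    have hsorted := sorted_cons_min h m hm
    by_cases hl : 1 < h.length
    · have hmem : m ∈ h := PySem.List.min?_mem hm
      have hlen : (h.erase m).length = k := by
        have := List.length_erase_of_mem hmem; omega
      have hne' : h.erase m ≠ [] := by
        intro he; rw [he] at hlen; simp at hlen
        omega
      have hsne : PySem.List.sorted (h.erase m) (fun x => x) ≠ [] := by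
        intro he; exact hne' ((PySem.List.sorted_eq_nil_iff _ _ _).mp he)
      rw [popLoopA]
      simp only [hl, dif_pos, hm, Option.getD_some]
      rw [ih (h.erase m) (c + m) (s ++ [m]) hlen hne', hsorted,
        List.dropLast_cons_of_ne_nil hsne]
      simp [add_assoc]
    · have hlen1 : h.length = 1 := by
        have : 0 < h.length := List.length_pos_iff.mpr hne
        omega
      obtain ⟨a, ha⟩ : ∃ a, h = [a] := List.length_eq_one_iff.mp hlen1
      subst ha
      have : PySem.List.sorted [a] (fun x : Int => x) = [a] :=
        PySem.List.sorted_eq_self_of_pairwise _ _ (by simp)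
      rw [popLoopA]
      simp [this]

-- ===== VERDICT (by name: the statement is the Claim_ definition above) =====
theorem find_optimal_sequence_spec : Claim_equal_find_optimal_sequence := by
  intro cables _
  unfold Spec_find_optimal_sequence find_optimal_sequence find_optimal_sequence_alt
  by_cases hc : cables = []
  · simp [hc]
  · simp only [hc, if_false]
    rw [popLoopA_spec cables.length cables 0 [] rfl hc,
      PySem.List.slice_to_neg_one]
    simp
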